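-- pv_equiv track=rewrite | github.com/cte/Roo-Code-Benchmark | python/dominoes/dominoes.py | can_chain
-- ===== SOURCE A (Python) =====
-- def can_chain(dominoes):
--     """
--     Determine if a list of dominoes can form a chain where adjacent dominoes match
--     and the first and last dominoes also match.
--
--     Args:
--         dominoes: List of dominoes, where each domino is a tuple of two integers
--
--     Returns:
--         A valid chain of dominoes or None if no valid chain can be formed
--     """
--     # Handle empty list case
--     if not dominoes:
--         return []
--
--     # Handle singleton case
--     if len(dominoes) == 1:
--         # For a single domino, it forms a valid chain only if both ends match
--         if dominoes[0][0] == dominoes[0][1]: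
--             return dominoes
--         return None
--
--     # For multiple dominoes, we need to try different arrangements
--     # We'll use backtracking to find a valid chain
--
--     # Make a copy of the dominoes list to avoid modifying the input
--     unused = dominoes.copy()
--
--     # Try each domino as the starting point
--     for i, domino in enumerate(dominoes):
--         # Try the domino in both orientations
--         for start_domino in [(domino[0], domino[1]), (domino[1], domino[0])]:
--             # Start with this domino
--             chain = [start_domino]
--             # Remove it from unused
--             unused.remove(domino)
--
--             # Try to build a chain starting with this domino
--             if build_chain(chain, unused):
--                 return chain
--
--             # If we couldn't build a chain, put the domino back and try another
--             unused.append(domino)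
--
--     # If we've tried all possibilities and couldn't find a valid chain
--     return None
--
-- def build_chain(chain, unused):
--     """
--     Recursively build a valid domino chain.
--
--     Args:
--         chain: The current chain of dominoes
--         unused: List of unused dominoes
--
--     Returns:
--         True if a valid chain was built, False otherwise
--     """
--     # If we've used all dominoes, check if the chain is valid
--     if not unused:
--         # Check if the first and last dominoes match
--         return chain[0][0] == chain[-1][1]
--
--     # Get the value we need to match
--     target = chain[-1][1]
--
--     # Try each unused domino
--     for i, domino in enumerate(unused):
--         # Try the domino in both orientations
--         for next_domino in [(domino[0], domino[1]), (domino[1], domino[0])]: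
--             # If the domino matches the target
--             if next_domino[0] == target:
--                 # Add it to the chain
--                 chain.append(next_domino)
--                 # Remove it from unused
--                 unused.pop(i)
--
--                 # Recursively try to build the rest of the chain
--                 if build_chain(chain, unused):
--                     return True
--
--                 # If we couldn't build a valid chain, backtrack
--                 unused.insert(i, domino)
--                 chain.pop()
--
--     # If we've tried all possibilities and couldn't find a valid chain
--     return False
-- ===== SOURCE B (Python) =====
-- def can_chain(dominoes):
--     """Find a valid domino chain (first pip of first == last pip of last) or None.
--
--     Same search as the original, but as an explicit-stack iterative DFS over
--     precomputed start frames instead of a recursive helper with mutation.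
--     """
--     if not dominoes:
--         return []
--     if len(dominoes) == 1:
--         return dominoes if dominoes[0][0] == dominoes[0][1] else None
--
--     # Precompute the start frames, mirroring the driver's unused bookkeeping
--     # (remove first equal occurrence, re-append at the end), without searching.
--     starts = []
--     u = list(dominoes)
--     for d in dominoes:
--         for sd in ((d[0], d[1]), (d[1], d[0])):
--             u.remove(d)
--             starts.append(([sd], list(u)))
--             u.append(d)
--
--     # Iterative DFS: a frame is (chain, unused, i, o) = "candidates from index
--     # i, orientation o, remain to be tried for extending chain".
--     stack = [(chain, unused, 0, 0) for chain, unused in reversed(starts)]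
--     while stack:
--         chain, unused, i, o = stack.pop()
--         if not unused:
--             if chain[0][0] == chain[-1][1]:
--                 return chain
--             continue
--         if i >= len(unused):
--             continue
--         # continuation: the next candidate after (i, o)
--         stack.append((chain, unused, i, 1) if o == 0 else (chain, unused, i + 1, 0))
--         d = unused[i]
--         nd = (d[0], d[1]) if o == 0 else (d[1], d[0])
--         if nd[0] == chain[-1][1]:
--             rest = list(unused)
--             del rest[i]
--             stack.append((chain + [nd], rest, 0, 0))
--     return None
-- ===== Notes on version B (the rewrite author's own statement) =====
-- stated objective: alternative
-- what changed: The recursive bool-returning backtracking helper with in-place chain/unused mutation is replaced by an iterative DFS over an explicit stack of (chain, unused, index, orientation) frames, with the start dominoes precomputed into start frames by a search-free pre-pass that mirrors the driver's remove/re-append bookkeeping.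
import Mathlib
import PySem

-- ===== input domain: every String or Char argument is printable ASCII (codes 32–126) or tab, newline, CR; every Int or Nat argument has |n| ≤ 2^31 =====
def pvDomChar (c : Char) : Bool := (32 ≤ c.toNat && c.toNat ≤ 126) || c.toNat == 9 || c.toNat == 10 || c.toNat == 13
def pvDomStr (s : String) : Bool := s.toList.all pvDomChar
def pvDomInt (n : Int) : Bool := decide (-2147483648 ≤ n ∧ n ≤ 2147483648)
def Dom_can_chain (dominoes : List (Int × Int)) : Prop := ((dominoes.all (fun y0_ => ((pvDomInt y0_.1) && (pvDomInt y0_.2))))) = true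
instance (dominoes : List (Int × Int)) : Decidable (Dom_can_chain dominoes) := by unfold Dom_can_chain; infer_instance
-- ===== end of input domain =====

-- B replaces the recursive backtracking helper by an explicit-stack iterative DFS over
-- precomputed start frames (same search order, same result); objective: alternative.

-- ===== PORT A =====

-- chain[0][0] == chain[-1][1]  (chain is always nonempty where A evaluates this)
def pvChainClosed (chain : List (Int × Int)) : Bool :=
  match chain.head?, chain.getLast? with
  | some a, some b => a.1 == b.2
  | _, _ => false

-- chain[-1][1]  (chain is always nonempty where A evaluates this)
def pvTarget (chain : List (Int × Int)) : Int :=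
  ((chain.getLast?).map Prod.snd).getD 0

-- unused.remove(d); the `none` branch is unreachable in both programs (d ∈ unused always)
def pvRemove (u : List (Int × Int)) (d : Int × Int) : List (Int × Int) :=
  (PySem.List.remove? u d).getD u

mutual
-- build_chain(chain, unused): returns the completed chain instead of (bool + in-place chain)
def buildChain (chain unused : List (Int × Int)) : Option (List (Int × Int)) :=
  if unused.isEmpty then
    if pvChainClosed chain then some chain else none
  else
    tryFrom chain unused 0
termination_by (unused.length, unused.length + 1)

-- the `for i, domino in enumerate(unused)` loop of build_chain, from index i
def tryFrom (chain unused : List (Int × Int)) (i : Nat) : Option (List (Int × Int)) :=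
  if h : i < unused.length then
    let d := unused[i]
    let t := pvTarget chain
    match (if d.1 == t then buildChain (chain ++ [(d.1, d.2)]) (unused.eraseIdx i) else none) with
    | some c => some c
    | none =>
      match (if d.2 == t then buildChain (chain ++ [(d.2, d.1)]) (unused.eraseIdx i) else none) with
      | some c => some c
      | none => tryFrom chain unused (i + 1)
  else none
termination_by (unused.length, unused.length - i)
decreasing_by
  · simp [List.length_eraseIdx, h]; omega
  · simp [List.length_eraseIdx, h]; omega
  · exact Prod.Lex.right _ (by omega)
end

-- the `for i, domino in enumerate(dominoes)` driver loop, with the mutable `unused`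
def chainDriver (ds u : List (Int × Int)) : Option (List (Int × Int)) :=
  match ds with
  | [] => none
  | d :: rest =>
    let u1 := pvRemove u d
    match buildChain [(d.1, d.2)] u1 with
    | some c => some c
    | none =>
      let u2 := pvRemove (u1 ++ [d]) d
      match buildChain [(d.2, d.1)] u2 with
      | some c => some c
      | none => chainDriver rest (u2 ++ [d])

def can_chain (dominoes : List (Int × Int)) : Option (List (Int × Int)) :=
  match dominoes with
  | [] => some []
  | [d] => if d.1 == d.2 then some [d] else none
  | ds => chainDriver ds ds

-- ===== PORT B =====

-- a DFS frame: (chain, unused, i, o)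
def PvFrame : Type := List (Int × Int) × List (Int × Int) × Nat × Nat

-- chain[-1][1]  (chain is always nonempty where B evaluates this)
def pvTargetB (chain : List (Int × Int)) : Int :=
  match chain.getLast? with
  | some p => p.2
  | none => 0

-- chain[0][0] == chain[-1][1]  (chain is always nonempty where B evaluates this)
def pvClosedB (chain : List (Int × Int)) : Bool :=
  match chain with
  | [] => false
  | c :: _ => c.1 == pvTargetB chain

-- u.remove(d) of the pre-pass; the `none` branch is unreachable (d ∈ u always)
def pvRemoveB (u : List (Int × Int)) (d : Int × Int) : List (Int × Int) :=
  match PySem.List.remove? u d with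
  | some r => r
  | none => u

-- termination measure helpers for the stack loop
def pvG : Nat → Nat
  | 0 => 1
  | m + 1 => 1 + 2 * (m + 1) * (1 + pvG m)

def pvMu (f : PvFrame) : Nat :=
  if f.2.1.isEmpty then 1
  else (2 * (f.2.1.length - f.2.2.1) - min f.2.2.2 1) * (1 + pvG (f.2.1.length - 1)) + 1

theorem pvMu_start (c u : List (Int × Int)) : pvMu (c, u, 0, 0) = pvG u.length := by
  cases u with
  | nil => simp [pvMu, pvG]
  | cons x xs => simp [pvMu, pvG, List.isEmpty]; ring

theorem pvMu_pos (f : PvFrame) : 1 ≤ pvMu f := by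
  unfold pvMu; split <;> omega

theorem pvMu_arith1 (k G : Nat) : (2 * k + 1) * (1 + G) + 1 + G < 2 * (k + 1) * (1 + G) + 1 := by
  nlinarith

theorem pvMu_arith2 (k G : Nat) : 2 * k * (1 + G) + 1 + G < (2 * k + 1) * (1 + G) + 1 := by
  nlinarith

theorem pvMu_step (c : List (Int × Int)) (u : List (Int × Int)) (i o : Nat)
    (hu : ¬ u.isEmpty) (h : i < u.length) :
    pvMu (if o == 0 then (c, u, i, 1) else (c, u, i + 1, 0)) + pvG (u.length - 1)
      < pvMu (c, u, i, o) := by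
  obtain ⟨k, hk⟩ : ∃ k, u.length - i = k + 1 := ⟨u.length - i - 1, by omega⟩
  by_cases ho : o = 0
  · simp only [ho, beq_self_eq_true, if_pos, pvMu, hu, if_neg, Bool.false_eq_true,
      not_false_eq_true]
    rw [hk]
    have e1 : 2 * (k + 1) - min 1 1 = 2 * k + 1 := by omega
    have e2 : 2 * (k + 1) - min 0 1 = 2 * (k + 1) := by omega
    rw [e1, e2]
    exact pvMu_arith1 k _
  · have hb : (o == 0) = false := by simpa using ho
    simp only [hb, pvMu, hu, Bool.false_eq_true, not_false_eq_true, if_neg]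
    have hk2 : u.length - (i + 1) = k := by omega
    rw [hk, hk2]
    have e1 : 2 * k - min 0 1 = 2 * k := by omega
    have e2 : 2 * (k + 1) - min o 1 = 2 * k + 1 := by omega
    rw [e1, e2]
    exact pvMu_arith2 k _

def pvStackMeasure (s : List PvFrame) : Nat := (s.map pvMu).sum

-- the while-stack loop of Source B (pop = head; pushes cont then child, so child is head)
def runStack (s : List PvFrame) : Option (List (Int × Int)) :=
  match s with
  | [] => none
  | (chain, u, i, o) :: s =>
    if u.isEmpty then
      if pvClosedB chain then some chain else runStack s
    else if h : i < u.length then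
      let cont : PvFrame := if o == 0 then (chain, u, i, 1) else (chain, u, i + 1, 0)
      let d := u[i]
      let nd := if o == 0 then (d.1, d.2) else (d.2, d.1)
      if nd.1 == pvTargetB chain then
        runStack ((chain ++ [nd], u.eraseIdx i, 0, 0) :: cont :: s)
      else
        runStack (cont :: s)
    else runStack s
termination_by pvStackMeasure s
decreasing_by
  · simp [pvStackMeasure]; have := pvMu_pos (chain, u, i, o); omega
  · have hc := pvMu_step chain u i o (by simp_all) h
    have hch : pvMu (chain ++ [if o == 0 then (u[i].1, u[i].2) else (u[i].2, u[i].1)], u.eraseIdx i, 0, 0) = pvG (u.length - 1) := by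
      rw [pvMu_start, List.length_eraseIdx_of_lt h]
    simp only [pvStackMeasure, List.map_cons, List.sum_cons, dite_eq_ite]
    omega
  · have hc := pvMu_step chain u i o (by simp_all) h
    simp only [pvStackMeasure, List.map_cons, List.sum_cons, dite_eq_ite]
    omega
  · simp [pvStackMeasure]; have := pvMu_pos (chain, u, i, o); omega

-- the pre-pass: start frames in driver order, with the driver's unused bookkeeping
def startFrames (ds u : List (Int × Int)) : List PvFrame :=
  match ds with
  | [] => []
  | d :: rest =>
    let u1 := pvRemoveB u d
    let u2 := pvRemoveB (u1 ++ [d]) d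
    ([(d.1, d.2)], u1, 0, 0) :: ([(d.2, d.1)], u2, 0, 0) :: startFrames rest (u2 ++ [d])

def can_chain_alt (dominoes : List (Int × Int)) : Option (List (Int × Int)) :=
  match dominoes with
  | [] => some []
  | d :: rest =>
    if rest.isEmpty then (if d.1 == d.2 then some [d] else none)
    else runStack (startFrames dominoes dominoes)

-- ===== PRECONDITION & SPEC =====
def Spec_can_chain (dominoes : List (Int × Int)) (out : Option (List (Int × Int))) : Prop := out = can_chain_alt dominoes
instance (dominoes : List (Int × Int)) (out : Option (List (Int × Int))) : Decidable (Spec_can_chain dominoes out) := by unfold Spec_can_chain; infer_instance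

-- ===== CLAIM (what is proved, stated in full; the proofs are below) =====
def Claim_equal_can_chain : Prop := ∀ (dominoes : List (Int × Int)), Dom_can_chain dominoes → Spec_can_chain dominoes (can_chain dominoes)

-- ===== LEMMAS AND PROOFS =====

-- A-side view of "orientation 2 of index i, then candidates from i+1"
def trySnd (chain unused : List (Int × Int)) (i : Nat) : Option (List (Int × Int)) :=
  if h : i < unused.length then
    match (if unused[i].2 == pvTarget chain
           then buildChain (chain ++ [(unused[i].2, unused[i].1)]) (unused.eraseIdx i) else none) with
    | some c => some c
    | none => tryFrom chain unused (i + 1)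
  else none

-- denotation of a B frame in A's terms
def den : PvFrame → Option (List (Int × Int))
  | (c, u, i, o) =>
    if u.isEmpty then (if pvChainClosed c then some c else none)
    else if o == 0 then tryFrom c u i else trySnd c u i

theorem targetAB (c : List (Int × Int)) : pvTargetB c = pvTarget c := by
  unfold pvTargetB pvTarget
  cases c.getLast? <;> rfl

theorem closedAB (c : List (Int × Int)) : pvChainClosed c = pvClosedB c := by
  unfold pvChainClosed pvClosedB
  cases c with
  | nil => rfl
  | cons x xs =>
    rw [targetAB]
    unfold pvTarget
    cases h : (x :: xs).getLast? with
    | some p => simp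
    | none => simp at h

theorem removeAB (u : List (Int × Int)) (d : Int × Int) : pvRemove u d = pvRemoveB u d := by
  unfold pvRemove pvRemoveB
  cases PySem.List.remove? u d <;> rfl

theorem den_start (c u : List (Int × Int)) : den (c, u, 0, 0) = buildChain c u := by
  by_cases hu : u.isEmpty <;> rw [den, buildChain] <;> simp [hu]

theorem tryFrom_split (c u : List (Int × Int)) (i : Nat) (h : i < u.length) :
    tryFrom c u i =
      ((if u[i].1 == pvTarget c
        then buildChain (c ++ [(u[i].1, u[i].2)]) (u.eraseIdx i) else none).or (trySnd c u i)) := by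
  rw [tryFrom, trySnd]
  simp only [h, dif_pos]
  cases hb : (if u[i].1 == pvTarget c then buildChain (c ++ [(u[i].1, u[i].2)]) (u.eraseIdx i) else none) <;> simp

theorem trySnd_split (c u : List (Int × Int)) (i : Nat) (h : i < u.length) :
    trySnd c u i =
      ((if u[i].2 == pvTarget c
        then buildChain (c ++ [(u[i].2, u[i].1)]) (u.eraseIdx i) else none).or (tryFrom c u (i + 1))) := by
  rw [trySnd]
  simp only [h, dif_pos]
  cases hb : (if u[i].2 == pvTarget c then buildChain (c ++ [(u[i].2, u[i].1)]) (u.eraseIdx i) else none) <;> simp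

theorem runStack_eq (s : List PvFrame) :
    runStack s = s.foldr (fun f acc => (den f).or acc) none := by
  induction s using runStack.induct with
  | case1 => simp [runStack]
  | case2 chain u i o s hu hcl =>
    have hue : u = [] := List.isEmpty_iff.mp hu
    subst hue
    rw [runStack]
    simp [hcl, den, closedAB]
  | case3 chain u i o s hu hcl ih =>
    have hue : u = [] := List.isEmpty_iff.mp hu
    subst hue
    rw [runStack]
    simp [hcl, den, closedAB, ih]
  | case4 chain u i o s hu h cont d nd hm ih =>
    have hm' : ((if (o == 0) = true then (u[i].1, u[i].2) else (u[i].2, u[i].1)).1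
        == pvTargetB chain) = true := hm
    have ih' : runStack
        ((chain ++ [if (o == 0) = true then (u[i].1, u[i].2) else (u[i].2, u[i].1)],
            u.eraseIdx i, 0, 0) ::
          (if (o == 0) = true then (chain, u, i, 1) else (chain, u, i + 1, 0)) :: s) =
        List.foldr (fun f acc => (den f).or acc) none
        ((chain ++ [if (o == 0) = true then (u[i].1, u[i].2) else (u[i].2, u[i].1)],
            u.eraseIdx i, 0, 0) ::
          (if (o == 0) = true then (chain, u, i, 1) else (chain, u, i + 1, 0)) :: s) := ih
    rw [runStack]
    rw [if_neg hu, dif_pos h]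
    rw [if_pos hm', ih']
    simp only [List.foldr_cons, den_start]
    rw [← Option.or_assoc]
    congr 1
    by_cases ho : (o == 0) = true
    · have hm2 : (u[i].1 == pvTarget chain) = true := by simpa [ho, targetAB] using hm'
      simp only [ho, if_true]
      rw [den, den, if_neg hu, if_neg hu]
      simp only [ho, if_true, show ((1:Nat) == 0) = false from rfl]
      rw [tryFrom_split chain u i h]
      simp [hm2]
    · have hm2 : (u[i].2 == pvTarget chain) = true := by simpa [ho, targetAB] using hm'
      simp only [ho, if_false, Bool.false_eq_true]
      rw [den, den, if_neg hu, if_neg hu]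
      simp only [ho, if_false, Bool.false_eq_true, show ((0:Nat) == 0) = true from rfl, if_true]
      rw [trySnd_split chain u i h]
      simp [hm2]
  | case5 chain u i o s hu h cont d nd hm ih =>
    have hm' : ¬ ((if (o == 0) = true then (u[i].1, u[i].2) else (u[i].2, u[i].1)).1
        == pvTargetB chain) = true := hm
    have ih' : runStack
        ((if (o == 0) = true then (chain, u, i, 1) else (chain, u, i + 1, 0)) :: s) =
        List.foldr (fun f acc => (den f).or acc) none
        ((if (o == 0) = true then (chain, u, i, 1) else (chain, u, i + 1, 0)) :: s) := ih
    rw [runStack]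
    rw [if_neg hu, dif_pos h]
    rw [if_neg hm', ih']
    simp only [List.foldr_cons]
    congr 1
    by_cases ho : (o == 0) = true
    · have hm2 : (u[i].1 == pvTarget chain) = false := by
        rw [← targetAB]; simpa [ho] using hm'
      simp only [ho, if_true]
      rw [den, den, if_neg hu, if_neg hu]
      simp only [ho, if_true, show ((1:Nat) == 0) = false from rfl, Bool.false_eq_true, if_false]
      rw [tryFrom_split chain u i h]
      simp [hm2]
    · have hm2 : (u[i].2 == pvTarget chain) = false := by
        rw [← targetAB]; simpa [ho] using hm'
      simp only [ho, if_false, Bool.false_eq_true]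
      rw [den, den, if_neg hu, if_neg hu]
      simp only [ho, if_false, Bool.false_eq_true, show ((0:Nat) == 0) = true from rfl, if_true]
      rw [trySnd_split chain u i h]
      simp [hm2]
  | case6 chain u i o s hu h ih =>
    rw [runStack]
    rw [if_neg hu, dif_neg h, ih]
    simp only [List.foldr_cons]
    have hd : den (chain, u, i, o) = none := by
      rw [den, if_neg hu]
      by_cases ho : (o == 0) = true <;> simp [ho, tryFrom, trySnd, h]
    rw [hd, Option.none_or]

theorem driver_eq (ds : List (Int × Int)) : ∀ u, chainDriver ds u = runStack (startFrames ds u) := by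
  induction ds with
  | nil => intro u; simp [chainDriver, startFrames, runStack]
  | cons d rest ih =>
    intro u
    rw [startFrames, runStack_eq, List.foldr_cons, List.foldr_cons, den_start, den_start,
      ← runStack_eq, ← ih]
    rw [chainDriver]
    simp only [removeAB]
    cases hb1 : buildChain [(d.1, d.2)] (pvRemoveB u d) with
    | some c => simp
    | none =>
      cases hb2 : buildChain [(d.2, d.1)] (pvRemoveB (pvRemoveB u d ++ [d]) d) with
      | some c => simp
      | none => simp

-- ===== VERDICT (by name: the statement is the Claim_ definition above) =====
theorem can_chain_spec : Claim_equal_can_chain := by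
  intro dominoes _
  unfold Spec_can_chain can_chain can_chain_alt
  match dominoes with
  | [] => rfl
  | [d] => rfl
  | d1 :: d2 :: rest =>
    simpa using driver_eq (d1 :: d2 :: rest) (d1 :: d2 :: rest)
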